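-- pv_equiv track=rewrite | github.com/ilwonyoon/3D_room_planner | scripts/blender/audit-hero-assets.py | material_signals
-- ===== SOURCE A (Python) =====
-- SIGNALS = {
--     "fabric": ["fabric", "seat", "cushion", "pillow", "leather"],
--     "wood": ["wood", "oak", "desk", "shelf", "veneer"],
--     "metal": ["metal", "steel", "frame", "leg", "hardware"],
--     "glass": ["glass", "window"],
--     "emissive": ["lamp", "emission", "emissive", "light_box", "_light"],
-- }
--
-- def material_signals(material_names):
--     result = {}
--     for signal, fragments in SIGNALS.items():
--         result[signal] = [
--             name
--             for name in material_names
--             if any(fragment in name.lower() for fragment in fragments)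
--         ]
--     return result
-- ===== SOURCE B (Python) =====
-- SIGNALS = {
--     "fabric": ["fabric", "seat", "cushion", "pillow", "leather"],
--     "wood": ["wood", "oak", "desk", "shelf", "veneer"],
--     "metal": ["metal", "steel", "frame", "leg", "hardware"],
--     "glass": ["glass", "window"],
--     "emissive": ["lamp", "emission", "emissive", "light_box", "_light"],
-- }
--
-- def material_signals(material_names):
--     # Stage 1: one pass over the names; each name is lowercased once and summarized
--     # as a bitmask (bit k set iff the name matches category k).
--     items = list(SIGNALS.items())
--     masks = []
--     for name in material_names:
--         lower = name.lower()
--         mask = 0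
--         for bit, (_, fragments) in enumerate(items):
--             if any(fragment in lower for fragment in fragments):
--                 mask |= 1 << bit
--         masks.append(mask)
--     # Stage 2: each bucket is a pure bit-filter over the precomputed masks;
--     # no substring work happens here.
--     return {
--         key: [name for name, mask in zip(material_names, masks) if (mask >> bit) & 1]
--         for bit, (key, _) in enumerate(items)
--     }
-- ===== Notes on version B (the rewrite author's own statement) =====
-- stated objective: alternative
-- what changed: B works in two stages through a different data structure: a first pass compresses each name (lowercased once) into an integer bitmask over the five categories, and a second pass builds each bucket by a pure bit-test filter over the precomputed masks, so no substring matching happens while the buckets are assembled; A instead rescans the whole name list with substring tests for every category.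
import Mathlib
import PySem

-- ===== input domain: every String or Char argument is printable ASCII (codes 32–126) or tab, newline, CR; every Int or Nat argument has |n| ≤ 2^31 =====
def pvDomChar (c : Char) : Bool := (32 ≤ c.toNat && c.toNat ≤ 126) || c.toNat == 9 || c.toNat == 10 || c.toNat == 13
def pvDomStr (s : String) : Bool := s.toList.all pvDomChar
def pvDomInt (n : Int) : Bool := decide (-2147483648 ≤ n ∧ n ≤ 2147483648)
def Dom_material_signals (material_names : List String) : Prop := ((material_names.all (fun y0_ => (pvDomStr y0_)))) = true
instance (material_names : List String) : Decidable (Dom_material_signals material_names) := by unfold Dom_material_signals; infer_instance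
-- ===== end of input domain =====

-- B re-groups the names in two stages (per-name category bitmasks, then pure bit-filters)
-- instead of A's per-category rescan with substring tests; equal return values are proved below.

-- the module-level SIGNALS dict, shared context of both programs
def signalsList : List (String × List String) :=
  [("fabric", ["fabric", "seat", "cushion", "pillow", "leather"]),
   ("wood", ["wood", "oak", "desk", "shelf", "veneer"]),
   ("metal", ["metal", "steel", "frame", "leg", "hardware"]),
   ("glass", ["glass", "window"]),
   ("emissive", ["lamp", "emission", "emissive", "light_box", "_light"])]

-- ===== PORT A =====
def material_signals (material_names : List String) : List (String × List String) :=
  (signalsList.foldl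
    (fun result p =>
      result.insert p.1
        (material_names.filter
          (fun name => p.2.any (fun fragment => PySem.Str.isIn fragment (PySem.Str.lower name)))))
    PySem.Dict.empty).items

-- ===== PORT B =====
def material_signals_alt (material_names : List String) : List (String × List String) :=
  let items := signalsList
  let masks : List Nat := material_names.foldl
    (fun masks name =>
      let lower := PySem.Str.lower name
      let mask := (PySem.List.enumerate items).foldl
        (fun mask bp =>
          if bp.2.2.any (fun fragment => PySem.Str.isIn fragment lower)
          then mask ||| (1 <<< bp.1.toNat) else mask) 0
      masks ++ [mask]) []
  ((PySem.List.enumerate items).foldl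
    (fun d bp =>
      d.insert bp.2.1
        (((material_names.zip masks).filter
            (fun nm => ((nm.2 >>> bp.1.toNat) &&& 1) != 0)).map Prod.fst))
    PySem.Dict.empty).items

-- ===== PRECONDITION & SPEC =====
def Spec_material_signals (material_names : List String) (out : List (String × List String)) : Prop := out = material_signals_alt material_names
instance (material_names : List String) (out : List (String × List String)) : Decidable (Spec_material_signals material_names out) := by unfold Spec_material_signals; infer_instance

-- ===== CLAIM (what is proved, stated in full; the proofs are below) =====
def Claim_equal_material_signals : Prop := ∀ (material_names : List String), Dom_material_signals material_names → Spec_material_signals material_names (material_signals material_names)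

-- ===== LEMMAS AND PROOFS =====

-- name matches category p
def pvMatch (p : String × List String) (name : String) : Bool :=
  p.2.any (fun fragment => PySem.Str.isIn fragment (PySem.Str.lower name))

-- B's stage-1 bitmask of one name
def pvMask (name : String) : Nat :=
  (PySem.List.enumerate signalsList).foldl
    (fun mask bp =>
      if bp.2.2.any (fun fragment => PySem.Str.isIn fragment (PySem.Str.lower name))
      then mask ||| (1 <<< bp.1.toNat) else mask) 0

theorem pvItemsEmpty : (PySem.Dict.empty : PySem.Dict String (List String)).items = [] := rfl

-- bit k of the mask is exactly "the name matches category k"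
theorem pvBits (name : String) :
    (((pvMask name >>> 0) &&& 1) != 0) = pvMatch ("fabric", ["fabric", "seat", "cushion", "pillow", "leather"]) name ∧
    (((pvMask name >>> 1) &&& 1) != 0) = pvMatch ("wood", ["wood", "oak", "desk", "shelf", "veneer"]) name ∧
    (((pvMask name >>> 2) &&& 1) != 0) = pvMatch ("metal", ["metal", "steel", "frame", "leg", "hardware"]) name ∧
    (((pvMask name >>> 3) &&& 1) != 0) = pvMatch ("glass", ["glass", "window"]) name ∧
    (((pvMask name >>> 4) &&& 1) != 0) = pvMatch ("emissive", ["lamp", "emission", "emissive", "light_box", "_light"]) name := by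
  simp only [pvMask, pvMatch, signalsList, PySem.List.enumerate, List.foldl]
  cases h0 : (["fabric", "seat", "cushion", "pillow", "leather"]).any
      (fun fragment => PySem.Str.isIn fragment (PySem.Str.lower name)) <;>
  cases h1 : (["wood", "oak", "desk", "shelf", "veneer"]).any
      (fun fragment => PySem.Str.isIn fragment (PySem.Str.lower name)) <;>
  cases h2 : (["metal", "steel", "frame", "leg", "hardware"]).any
      (fun fragment => PySem.Str.isIn fragment (PySem.Str.lower name)) <;>
  cases h3 : (["glass", "window"]).any
      (fun fragment => PySem.Str.isIn fragment (PySem.Str.lower name)) <;>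
  cases h4 : (["lamp", "emission", "emissive", "light_box", "_light"]).any
      (fun fragment => PySem.Str.isIn fragment (PySem.Str.lower name)) <;> decide

-- filtering the (name, mask) pairs by a mask test is filtering the names by the test of their mask
theorem pvZipFilter (ns : List String) (f : String → Nat) (q : Nat → Bool) :
    (((ns.zip (ns.map f)).filter (fun nm => q nm.2)).map Prod.fst)
      = ns.filter (fun n => q (f n)) := by
  induction ns with
  | nil => simp
  | cons n ns ih =>
      by_cases h : q (f n) = true <;> simp [h, ih]

theorem material_signals_spec : Claim_equal_material_signals := by
  intro ns _
  simp only [Spec_material_signals, material_signals, material_signals_alt]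
  have hmasks : ns.foldl
      (fun masks name =>
        masks ++ [(PySem.List.enumerate signalsList).foldl
          (fun mask bp =>
            if bp.2.2.any (fun fragment => PySem.Str.isIn fragment (PySem.Str.lower name))
            then mask ||| (1 <<< bp.1.toNat) else mask) 0]) []
      = ns.map pvMask := by
    simpa [pvMask] using
      PySem.List.foldl_append_singleton_eq_map (f := pvMask) (l := ns) (acc := [])
  rw [hmasks]
  simp only [signalsList, PySem.List.enumerate, List.foldl]
  simp [PySem.Dict.items_insert_of_not_contains, PySem.Dict.contains_insert,
    PySem.Dict.contains_empty, pvItemsEmpty]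
  refine ⟨?_, ?_, ?_, ?_, ?_⟩ <;>
  [ rw [pvZipFilter ns pvMask (fun m => m % 2 == 1)];
    rw [pvZipFilter ns pvMask (fun m => m >>> 1 % 2 == 1)];
    rw [pvZipFilter ns pvMask (fun m => m >>> 2 % 2 == 1)];
    rw [pvZipFilter ns pvMask (fun m => m >>> 3 % 2 == 1)];
    rw [pvZipFilter ns pvMask (fun m => m >>> 4 % 2 == 1)] ] <;>
  · apply List.filter_congr
    intro n _
    have hbn := pvBits n
    simp [pvMatch] at hbn ⊢
    first
      | exact hbn.1.symm
      | exact hbn.2.1.symm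
      | exact hbn.2.2.1.symm
      | exact hbn.2.2.2.1.symm
      | exact hbn.2.2.2.2.symm
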